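-- pv_equiv track=rewrite | github.com/ElleryAree/adventofcode | advent23/12_hot_springs.py | is_valid_old
-- ===== SOURCE A (Python) =====
-- def is_valid_old(springs, numbers):
--     groups = []
--     group = 0
--
--     for spring in springs:
--         if spring == '#':
--             group += 1
--         if spring == '.':
--             if group != 0:
--                 groups.append(group)
--             group = 0
--     if group != 0:
--         groups.append(group)
--
--     return groups == numbers
-- ===== SOURCE B (Python) =====
-- def is_valid_old(springs, numbers):
--     filtered = ''.join(c for c in springs if c in '#.')
--     return [len(run) for run in filtered.split('.') if run] == numbers
-- ===== Notes on version B (the rewrite author's own statement) =====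
-- stated objective: simpler
-- what changed: Replaced A's per-character state machine (running group counter with conditional appends) by a filter-then-split decomposition: keep only '#' and '.' characters, split on '.', and compare the lengths of the nonempty runs.
import Mathlib
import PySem

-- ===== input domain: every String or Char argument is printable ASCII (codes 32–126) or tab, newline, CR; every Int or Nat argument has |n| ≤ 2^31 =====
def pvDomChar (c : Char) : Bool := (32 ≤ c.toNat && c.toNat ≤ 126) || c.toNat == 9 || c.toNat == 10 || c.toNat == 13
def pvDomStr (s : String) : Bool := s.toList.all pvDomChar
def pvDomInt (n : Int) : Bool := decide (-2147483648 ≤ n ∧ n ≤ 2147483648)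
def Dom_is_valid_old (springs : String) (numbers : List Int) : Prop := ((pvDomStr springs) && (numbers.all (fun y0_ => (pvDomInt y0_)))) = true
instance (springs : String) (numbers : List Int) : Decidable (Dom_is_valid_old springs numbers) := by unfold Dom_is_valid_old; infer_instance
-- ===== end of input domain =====

-- B replaces A's per-character state machine by a filter-then-split decomposition
-- (keep only '#'/'.', split on '.', take lengths of nonempty runs): simpler, not faster.

-- ===== PORT A =====
-- one loop iteration of A: two sequential ifs over the state (groups, group)
def pvStepA (st : List Int × Int) (c : Char) : List Int × Int :=
  let st1 := if c == '#' then (st.1, st.2 + 1) else st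
  if c == '.' then ((if st1.2 ≠ 0 then st1.1 ++ [st1.2] else st1.1), 0) else st1

def is_valid_old (springs : String) (numbers : List Int) : Bool :=
  let r := springs.toList.foldl pvStepA ([], 0)
  (if r.2 ≠ 0 then r.1 ++ [r.2] else r.1) == numbers

-- ===== PORT B =====
def is_valid_old_alt (springs : String) (numbers : List Int) : Bool :=
  let filtered := springs.toList.filter (fun c => c == '#' || c == '.')
  ((filtered.splitOn '.').filter (fun run => !run.isEmpty)).map
      (fun run => (run.length : Int)) == numbers

-- ===== PRECONDITION & SPEC =====
def Spec_is_valid_old (springs : String) (numbers : List Int) (out : Bool) : Prop := out = is_valid_old_alt springs numbers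
instance (springs : String) (numbers : List Int) (out : Bool) : Decidable (Spec_is_valid_old springs numbers out) := by unfold Spec_is_valid_old; infer_instance

-- ===== CLAIM (what is proved, stated in full; the proofs are below) =====
def Claim_equal_is_valid_old : Prop := ∀ (springs : String) (numbers : List Int), Dom_is_valid_old springs numbers → Spec_is_valid_old springs numbers (is_valid_old springs numbers)

-- ===== LEMMAS AND PROOFS =====

-- reference function: the run lengths of '#'-groups with a pending group of size n
def pvRuns : Nat → List Char → List Int
  | n, [] => if n ≠ 0 then [(n : Int)] else []
  | n, c :: cs =>
    if c = '#' then pvRuns (n + 1) cs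
    else if c = '.' then (if n ≠ 0 then [(n : Int)] else []) ++ pvRuns 0 cs
    else pvRuns n cs

theorem pvA_loop (cs : List Char) : ∀ (gs : List Int) (n : Nat),
    (let r := cs.foldl pvStepA (gs, (n : Int));
     if r.2 ≠ 0 then r.1 ++ [r.2] else r.1) = gs ++ pvRuns n cs := by
  induction cs with
  | nil =>
    intro gs n
    simp only [List.foldl_nil, pvRuns]
    by_cases h : n = 0 <;> simp [h]
  | cons c cs ih =>
    intro gs n
    simp only [List.foldl_cons, pvRuns, pvStepA]
    by_cases h1 : c = '#'
    · have h := ih gs (n + 1)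
      rw [show ((n + 1 : Nat) : Int) = (n : Int) + 1 from by push_cast; ring] at h
      simpa [h1] using h
    · by_cases h2 : c = '.'
      · by_cases h3 : n = 0
        · simpa [h1, h2, h3] using ih gs 0
        · have hn : (n : Int) ≠ 0 := by exact_mod_cast h3
          simpa [h1, h2, h3, hn, List.append_assoc] using ih (gs ++ [(n : Int)]) 0
      · simp [h1, h2, ih gs n]

theorem pvModifyHead_id {α : Type} (l : List α) : l.modifyHead (fun x => x) = l := by
  cases l <;> rfl

theorem pvB_loop (cs : List Char) : ∀ (n : Nat),
    ((((cs.filter (fun c => c == '#' || c == '.')).splitOn '.').modifyHead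
        (fun run => List.replicate n '#' ++ run)).filter (fun run => !run.isEmpty)).map
      (fun run => (run.length : Int)) = pvRuns n cs := by
  induction cs with
  | nil =>
    intro n
    simp only [List.filter_nil, List.splitOn, List.splitOnP_nil, List.modifyHead, pvRuns,
      List.append_nil]
    by_cases h : n = 0 <;> simp [h]
  | cons c cs ih =>
    intro n
    by_cases h1 : c = '#'
    · have hsplit : ((c :: cs.filter (fun c => c == '#' || c == '.')).splitOn '.') =
          ((cs.filter (fun c => c == '#' || c == '.')).splitOn '.').modifyHead (c :: ·) := by
        simp [List.splitOn, List.splitOnP_cons, h1]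
      rw [List.filter_cons_of_pos (by simp [h1]), hsplit, List.modifyHead_modifyHead]
      have hfun : ((fun run => List.replicate n '#' ++ run) ∘ fun x => c :: x) =
          (fun run => List.replicate (n + 1) '#' ++ run) := by
        funext run; simp [h1, List.replicate_succ', List.append_assoc]
      rw [hfun, show pvRuns n (c :: cs) = pvRuns (n + 1) cs from by simp [pvRuns, h1]]
      exact ih (n + 1)
    · by_cases h2 : c = '.'
      · have hsplit : ((c :: cs.filter (fun c => c == '#' || c == '.')).splitOn '.') =
            [] :: ((cs.filter (fun c => c == '#' || c == '.')).splitOn '.') := by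
          simp [List.splitOn, List.splitOnP_cons, h2]
        rw [List.filter_cons_of_pos (by simp [h2]), hsplit]
        have ih0 := ih 0
        simp only [List.replicate_zero, List.nil_append, pvModifyHead_id] at ih0
        simp only [List.modifyHead, List.append_nil, pvRuns, h2]
        by_cases h3 : n = 0
        · simp [h3, ih0]
        · simp [h3, ih0]
      · rw [List.filter_cons_of_neg (by simp [h1, h2])]
        simp only [pvRuns, h1, h2, if_false]
        exact ih n

-- ===== VERDICT (by name: the statement is the Claim_ definition above) =====
theorem is_valid_old_spec : Claim_equal_is_valid_old := by
  intro springs numbers _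
  unfold Spec_is_valid_old is_valid_old is_valid_old_alt
  have hA := pvA_loop springs.toList [] 0
  have hB := pvB_loop springs.toList 0
  simp only [List.replicate_zero, List.nil_append, pvModifyHead_id] at hB
  simp only [Nat.cast_zero] at hA
  simp only [hA, hB, List.nil_append]
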